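-- pv_equiv track=rewrite | github.com/b-trayer/distributed-systems | resilient-hash-search/worker/main.py | number_to_word
-- ===== SOURCE A (Python) =====
-- def number_to_word(number, alphabet):
--     alphabet_size = len(alphabet)
--     word_length = 1
--     words_before = 0
--     while True:
--         words_of_this_length = alphabet_size**word_length
--         if number < words_before + words_of_this_length:
--             position = number - words_before
--             letters = []
--             for _ in range(word_length):
--                 letters.append(alphabet[position % alphabet_size])
--                 position //= alphabet_size
--             return "".join(reversed(letters))
--         words_before += words_of_this_length
--         word_length += 1
-- ===== SOURCE B (Python) =====
-- def number_to_word(number, alphabet):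
--     alphabet_size = len(alphabet)
--     m = number + 1
--     letters = []
--     while m > 0:
--         m -= 1
--         letters.append(alphabet[m % alphabet_size])
--         m //= alphabet_size
--     return "".join(reversed(letters))
-- ===== Notes on version B (the rewrite author's own statement) =====
-- stated objective: simpler
-- what changed: B replaces A's two-phase scheme (outer loop finding the word length via cumulative powers, then a fixed-width digit loop) with a single-pass bijective base-k conversion of number+1 (Excel-column style).
-- outside the precondition, e.g. on number_to_word(-1, 'ab'): A returns 'b', B returns ''
import Mathlib
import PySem

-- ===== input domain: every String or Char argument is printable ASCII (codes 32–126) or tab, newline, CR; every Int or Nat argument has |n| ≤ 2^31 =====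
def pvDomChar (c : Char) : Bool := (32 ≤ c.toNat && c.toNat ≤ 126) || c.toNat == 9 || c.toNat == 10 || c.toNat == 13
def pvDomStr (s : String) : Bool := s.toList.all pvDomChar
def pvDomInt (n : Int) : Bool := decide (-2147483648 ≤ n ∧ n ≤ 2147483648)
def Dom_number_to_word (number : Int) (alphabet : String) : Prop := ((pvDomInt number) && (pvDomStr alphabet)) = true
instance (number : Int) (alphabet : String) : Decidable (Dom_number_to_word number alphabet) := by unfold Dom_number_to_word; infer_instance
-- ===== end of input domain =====

-- B replaces A's length-search-then-fixed-width-digits scheme with a single-pass bijective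
-- base-k (Excel-column) conversion of number+1; objective: simpler.


-- ===== PORT A =====
-- inner 'for _ in range(word_length)' loop: letters collected least-significant first
-- (pyGetD with default ' ' is only a totality guard: under Pre_ the index 'position % k' is in range)
def pvDigitsA (al : List Char) (position : Int) : Nat → List Char
  | 0 => []
  | n + 1 =>
    PySem.List.pyGetD al (PySem.Int.mod position (al.length : Int)) ' ' ::
      pvDigitsA al (PySem.Int.floordiv position (al.length : Int)) n

-- the 'while True' loop, made total with fuel (fuel suffices whenever Pre_ holds)
def pvLoopA (number : Int) (al : List Char) (wordLength : Nat) (wordsBefore : Int) : Nat → String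
  | 0 => ""
  | fuel + 1 =>
    let wordsOfThisLength : Int := (al.length : Int) ^ wordLength
    if number < wordsBefore + wordsOfThisLength then
      String.ofList (pvDigitsA al (number - wordsBefore) wordLength).reverse
    else pvLoopA number al (wordLength + 1) (wordsBefore + wordsOfThisLength) fuel

def number_to_word (number : Int) (alphabet : String) : String :=
  pvLoopA number alphabet.toList 1 0 (number.toNat + 1)

-- ===== PORT B =====
-- the 'while m > 0' loop, fuel-total; letters appended least-significant first
def pvLoopB (al : List Char) (m : Int) (letters : List Char) : Nat → List Char
  | 0 => letters
  | fuel + 1 =>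
    if m > 0 then
      let m1 := m - 1
      pvLoopB al (PySem.Int.floordiv m1 (al.length : Int))
        (letters ++ [PySem.List.pyGetD al (PySem.Int.mod m1 (al.length : Int)) ' ']) fuel
    else letters

def number_to_word_alt (number : Int) (alphabet : String) : String :=
  String.ofList (pvLoopB alphabet.toList (number + 1) [] (number + 1).toNat).reverse

-- ===== PRECONDITION & SPEC =====
-- Pre_ restricts to the function's natural domain: non-negative word indices and a non-empty
-- alphabet. On negative number A's one-letter result alphabet[number % size] is an artefact of
-- Python's negative modulo; on empty alphabet A never returns (it loops forever or raises).
def Pre_number_to_word (number : Int) (alphabet : String) : Prop := 0 ≤ number ∧ alphabet ≠ ""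
instance (number : Int) (alphabet : String) : Decidable (Pre_number_to_word number alphabet) := by
  unfold Pre_number_to_word; infer_instance
def pvWitness_number_to_word : Int × String := (3, "ab")

def Spec_number_to_word (number : Int) (alphabet : String) (out : String) : Prop :=
  out = number_to_word_alt number alphabet
instance (number : Int) (alphabet : String) (out : String) : Decidable (Spec_number_to_word number alphabet out) := by
  unfold Spec_number_to_word; infer_instance

-- ===== CLAIM (what is proved, stated in full; the proofs are below) =====
def Claim_equal_number_to_word : Prop := ∀ (number : Int) (alphabet : String),
  Dom_number_to_word number alphabet → Pre_number_to_word number alphabet →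
  Spec_number_to_word number alphabet (number_to_word number alphabet)

-- ===== LEMMAS AND PROOFS =====

-- S k L = k + k^2 + … + k^L, the count of words shorter than length L+1
def pvS (k : Nat) : Nat → Nat
  | 0 => 0
  | L + 1 => k * (pvS k L + 1)

-- bijective base-k digits of m, least-significant first
def pvBij (k m : Nat) : List Nat :=
  if h : m = 0 then [] else (m - 1) % k :: pvBij k ((m - 1) / k)
termination_by m
decreasing_by exact lt_of_le_of_lt (Nat.div_le_self _ _) (Nat.sub_lt (Nat.pos_of_ne_zero h) one_pos)

-- fixed-width base-k digits, least-significant first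
def pvNatDigits (k p : Nat) : Nat → List Nat
  | 0 => []
  | n + 1 => p % k :: pvNatDigits k (p / k) n

theorem pvS_succ' (k L : Nat) : pvS k (L + 1) = pvS k L + k ^ (L + 1) := by
  induction L with
  | zero => simp [pvS]
  | succ L ih =>
    show k * (pvS k (L + 1) + 1) = k * (pvS k L + 1) + k ^ (L + 2)
    rw [ih]; ring

theorem pvS_ge (k L : Nat) (hk : 1 ≤ k) : L ≤ pvS k L := by
  induction L with
  | zero => simp
  | succ L ih =>
    have : pvS k L + 1 ≤ k * (pvS k L + 1) := Nat.le_mul_of_pos_left _ hk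
    show L + 1 ≤ k * (pvS k L + 1)
    omega

-- the heart: A's fixed-width digits of (n - S L) at the stopping length equal B's bijective digits of n+1
theorem pvKey (k : Nat) (hk : 1 ≤ k) :
    ∀ (L n : Nat), pvS k L ≤ n → n < pvS k (L + 1) →
      pvNatDigits k (n - pvS k L) (L + 1) = pvBij k (n + 1) := by
  intro L
  induction L with
  | zero =>
    intro n _ h2
    have hn : n < k := by simpa [pvS] using h2
    rw [pvBij]
    simp [pvNatDigits, pvS, Nat.mod_eq_of_lt hn, Nat.div_eq_of_lt hn, pvBij]
  | succ L ih =>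
    intro n h1 h2
    have hS : pvS k (L + 1) = k * (pvS k L + 1) := rfl
    have hS2 : pvS k (L + 2) = k * (pvS k (L + 1) + 1) := rfl
    -- bounds for n' = n / k - 1
    have hdiv1 : pvS k L + 1 ≤ n / k :=
      (Nat.le_div_iff_mul_le (by omega)).2 (by rw [Nat.mul_comm]; exact hS ▸ h1)
    have hdiv2 : n / k < pvS k (L + 1) + 1 :=
      (Nat.div_lt_iff_lt_mul (by omega)).2 (by rw [Nat.mul_comm]; exact hS2 ▸ h2)
    set n' := n / k - 1 with hn'
    have hb1 : pvS k L ≤ n' := by omega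
    have hb2 : n' < pvS k (L + 1) := by omega
    have hmod : (n - pvS k (L + 1)) % k = n % k := by
      rw [hS, Nat.sub_mul_mod (by omega : k * (pvS k L + 1) ≤ n)]
    have hdivsub : (n - pvS k (L + 1)) / k = n' - pvS k L := by
      rw [hS, Nat.sub_mul_div]
      omega
    have hrec : pvBij k (n + 1) = n % k :: pvBij k (n / k) := by
      rw [pvBij]; simp
    rw [hrec]
    show (n - pvS k (L + 1)) % k :: pvNatDigits k ((n - pvS k (L + 1)) / k) (L + 1) = _
    rw [hmod, hdivsub, ih n' hb1 hb2]
    have : n' + 1 = n / k := by omega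
    rw [this]

theorem pvDigitsA_natCast (al : List Char) :
    ∀ (len p : Nat), pvDigitsA al (p : Int) len =
      (pvNatDigits al.length p len).map (fun d => al.getD d ' ') := by
  intro len
  induction len with
  | zero => intro p; rfl
  | succ n ih =>
    intro p
    simp only [pvDigitsA, pvNatDigits, PySem.Int.mod_natCast, PySem.Int.floordiv_natCast,
      PySem.List.pyGetD_natCast, List.map]
    rw [ih]

theorem pvLoopB_run (al : List Char) :
    ∀ (fuel m : Nat) (acc : List Char), m ≤ fuel →
      pvLoopB al (m : Int) acc fuel = acc ++ (pvBij al.length m).map (fun d => al.getD d ' ') := by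
  intro fuel
  induction fuel with
  | zero =>
    intro m acc hm
    have : m = 0 := by omega
    subst this
    rw [pvBij]; simp [pvLoopB]
  | succ fuel ih =>
    intro m acc hm
    by_cases h0 : m = 0
    · subst h0; rw [pvBij]; simp [pvLoopB]
    · have hpos : (0 : Int) < (m : Int) := by exact_mod_cast Nat.pos_of_ne_zero h0
      have hm1 : ((m : Int) - 1) = ((m - 1 : Nat) : Int) := by omega
      have hbm : pvBij al.length m =
          (m - 1) % al.length :: pvBij al.length ((m - 1) / al.length) := by
        rw [pvBij]; simp [h0]
      rw [pvLoopB]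
      simp only [hpos, if_pos]
      rw [hm1, PySem.Int.floordiv_natCast, PySem.Int.mod_natCast, PySem.List.pyGetD_natCast]
      rw [ih ((m - 1) / al.length) _ (le_trans (Nat.div_le_self _ _) (by omega))]
      rw [hbm]
      simp [List.append_assoc]

theorem pvLoopA_run (al : List Char) (hk : 1 ≤ al.length) :
    ∀ (fuel i n : Nat), pvS al.length i ≤ n → n < pvS al.length (i + fuel) →
      pvLoopA (n : Int) al (i + 1) ((pvS al.length i : Nat) : Int) fuel =
        String.ofList ((pvBij al.length (n + 1)).map (fun d => al.getD d ' ')).reverse := by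
  intro fuel
  induction fuel with
  | zero => intro i n h1 h2; simp only [Nat.add_zero] at h2; omega
  | succ fuel ih =>
    intro i n h1 h2
    have hpow : ((al.length : Int) ^ (i + 1)) = ((al.length ^ (i + 1) : Nat) : Int) := by
      push_cast; ring
    rw [pvLoopA]
    simp only [hpow]
    by_cases hstop : n < pvS al.length (i + 1)
    · have hlt : (n : Int) < (pvS al.length i : Int) + ((al.length ^ (i + 1) : Nat) : Int) := by
        have h := pvS_succ' al.length i; omega
      rw [if_pos hlt]
      have hsub : (n : Int) - (pvS al.length i : Int) = ((n - pvS al.length i : Nat) : Int) := by omega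
      rw [hsub, pvDigitsA_natCast, pvKey al.length hk i n h1 hstop]
    · have hge : ¬ ((n : Int) < (pvS al.length i : Int) + ((al.length ^ (i + 1) : Nat) : Int)) := by
        have h := pvS_succ' al.length i; omega
      rw [if_neg hge]
      have hsum : (pvS al.length i : Int) + ((al.length ^ (i + 1) : Nat) : Int) = ((pvS al.length (i + 1) : Nat) : Int) := by
        rw [pvS_succ' al.length i]; push_cast; ring
      rw [hsum]
      refine ih (i + 1) n (by omega) ?_
      have e : i + 1 + fuel = i + (fuel + 1) := by omega
      rw [e]; exact h2

-- ===== VERDICT (by name: the statement is the Claim_ definition above) =====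
theorem number_to_word_spec : Claim_equal_number_to_word := by
  intro number alphabet _ hpre
  obtain ⟨hn, hal⟩ := hpre
  have hlist : alphabet.toList ≠ [] := fun h => hal (String.toList_eq_nil_iff.1 h)
  have hk : 1 ≤ alphabet.toList.length := by
    have := List.length_pos_of_ne_nil hlist; omega
  set nn := number.toNat with hnn
  have hcast : number = (nn : Int) := by omega
  show number_to_word number alphabet = number_to_word_alt number alphabet
  unfold number_to_word number_to_word_alt
  rw [hcast]
  have h2 : ((nn : Int)) + 1 = ((nn + 1 : Nat) : Int) := by push_cast; ring
  rw [h2, Int.toNat_natCast, Int.toNat_natCast]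
  have hA := pvLoopA_run alphabet.toList hk (nn + 1) 0 nn (by simp [pvS])
    (by have := pvS_ge alphabet.toList.length (0 + (nn + 1)) hk; omega)
  have hB := pvLoopB_run alphabet.toList (nn + 1) (nn + 1) [] (le_refl _)
  simp only [pvS, Nat.zero_add, Nat.cast_zero] at hA
  rw [hA, hB]
  simp
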